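-- pv_equiv track=rewrite | github.com/vreis/pytorch | aten/src/ATen/tensor_options_utils.py | check_if_factory_method
-- ===== SOURCE A (Python) =====
-- def check_if_factory_method(args):
--     for arg in args:
--         if 'type' not in arg:
--             return False
--
--     a = any(arg['type'] == 'c10::optional<ScalarType>' for arg in args) and any(arg['type'] == 'c10::optional<Layout>' for arg in args) and any(arg['type'] == 'c10::optional<Device>' for arg in args) and any(arg['type'] == 'c10::optional<bool>' for arg in args)
--     c = any(arg['type'] == 'ScalarType' for arg in args) and any(arg['type'] == 'Layout' for arg in args) and any(arg['type'] == 'Device' for arg in args) and any(arg['type'] == 'bool' for arg in args)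
--     b = any('TensorOptions' in arg['type'] for arg in args)
--
--     return a or b or c
-- ===== SOURCE B (Python) =====
-- def check_if_factory_method(args):
--     seen = set()
--     has_tensoropts = False
--     for arg in args:
--         if 'type' not in arg:
--             return False
--         t = arg['type']
--         seen.add(t)
--         if 'TensorOptions' in t:
--             has_tensoropts = True
--     a = {'c10::optional<ScalarType>', 'c10::optional<Layout>',
--          'c10::optional<Device>', 'c10::optional<bool>'} <= seen
--     c = {'ScalarType', 'Layout', 'Device', 'bool'} <= seen
--     return a or has_tensoropts or c
-- ===== Notes on version B (the rewrite author's own statement) =====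
-- stated objective: alternative
-- what changed: Replaces nine separate any() scans over args with one pass that builds a set of seen types and a TensorOptions flag, then decides by set inclusion; same cost in practice since A's scans short-circuit.
import Mathlib
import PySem

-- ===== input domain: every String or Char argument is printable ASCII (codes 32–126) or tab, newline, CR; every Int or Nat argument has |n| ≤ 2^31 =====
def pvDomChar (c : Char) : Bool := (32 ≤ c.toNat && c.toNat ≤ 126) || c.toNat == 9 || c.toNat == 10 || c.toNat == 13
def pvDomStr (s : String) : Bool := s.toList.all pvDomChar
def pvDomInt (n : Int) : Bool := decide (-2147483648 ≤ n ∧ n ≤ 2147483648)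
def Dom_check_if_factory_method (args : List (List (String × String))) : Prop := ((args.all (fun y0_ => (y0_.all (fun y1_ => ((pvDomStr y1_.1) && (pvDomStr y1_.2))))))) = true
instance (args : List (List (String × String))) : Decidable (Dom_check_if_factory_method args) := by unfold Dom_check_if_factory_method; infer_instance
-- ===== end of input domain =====

-- B replaces A's nine separate any() scans by one pass building a set of seen
-- types plus a TensorOptions flag, then decides by set membership.

-- ===== PORT A =====
-- arg['type'] (only evaluated after the 'type' ∈ arg loop has passed, so the default is never used)
def pvTy (arg : List (String × String)) : String :=
  ((PySem.Dict.mk arg).get? "type").getD ""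

-- the initial 'for arg in args: if 'type' not in arg: return False' loop
def pvAllHaveType : List (List (String × String)) → Bool
  | [] => true
  | arg :: rest =>
    if (PySem.Dict.mk arg).contains "type" then pvAllHaveType rest else false

def check_if_factory_method (args : List (List (String × String))) : Bool :=
  if pvAllHaveType args then
    let a := (args.any (fun arg => pvTy arg == "c10::optional<ScalarType>"))
          && (args.any (fun arg => pvTy arg == "c10::optional<Layout>"))
          && (args.any (fun arg => pvTy arg == "c10::optional<Device>"))
          && (args.any (fun arg => pvTy arg == "c10::optional<bool>"))
    let c := (args.any (fun arg => pvTy arg == "ScalarType"))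
          && (args.any (fun arg => pvTy arg == "Layout"))
          && (args.any (fun arg => pvTy arg == "Device"))
          && (args.any (fun arg => pvTy arg == "bool"))
    let b := args.any (fun arg => PySem.Str.isIn "TensorOptions" (pvTy arg))
    a || b || c
  else false

-- ===== PORT B =====
-- single pass: none = early 'return False'; otherwise (seen types, TensorOptions flag)
def pvScan : List (List (String × String)) → PySem.Set String → Bool →
    Option (PySem.Set String × Bool)
  | [], seen, flag => some (seen, flag)
  | arg :: rest, seen, flag =>
    match (PySem.Dict.mk arg).get? "type" with
    | none => none
    | some t => pvScan rest (PySem.Set.add seen t) (flag || PySem.Str.isIn "TensorOptions" t)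

def check_if_factory_method_alt (args : List (List (String × String))) : Bool :=
  match pvScan args PySem.Set.empty false with
  | none => false
  | some (seen, flag) =>
    (["c10::optional<ScalarType>", "c10::optional<Layout>",
      "c10::optional<Device>", "c10::optional<bool>"].all (fun t => PySem.Set.contains seen t))
    || flag
    || (["ScalarType", "Layout", "Device", "bool"].all (fun t => PySem.Set.contains seen t))

-- ===== PRECONDITION & SPEC =====
def Spec_check_if_factory_method (args : List (List (String × String))) (out : Bool) : Prop := out = check_if_factory_method_alt args
instance (args : List (List (String × String))) (out : Bool) : Decidable (Spec_check_if_factory_method args out) := by unfold Spec_check_if_factory_method; infer_instance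

-- ===== CLAIM (what is proved, stated in full; the proofs are below) =====
def Claim_equal_check_if_factory_method : Prop := ∀ (args : List (List (String × String))), Dom_check_if_factory_method args → Spec_check_if_factory_method args (check_if_factory_method args)

-- ===== LEMMAS AND PROOFS =====

theorem pvContains_add (seen : PySem.Set String) (t u : String) :
    (PySem.Set.add seen t).contains u = (seen.contains u || (t == u)) := by
  apply Bool.eq_iff_iff.mpr
  rw [Bool.or_eq_true, beq_iff_eq, PySem.Set.contains_iff, PySem.Set.contains_iff,
    PySem.Set.mem_add]
  constructor
  · rintro (hm | hm)
    · exact Or.inl hm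
    · exact Or.inr hm.symm
  · rintro (hm | hm)
    · exact Or.inl hm
    · exact Or.inr hm.symm

theorem pvGet_type_some (arg : List (String × String))
    (hc : (PySem.Dict.mk arg).contains "type" = true) :
    (PySem.Dict.mk arg).get? "type" = some (pvTy arg) := by
  rcases hg : (PySem.Dict.mk arg).get? "type" with _ | t
  · rw [PySem.Dict.get?_eq_none_iff_contains, hc] at hg
    exact absurd hg (by simp)
  · simp [pvTy, hg]

theorem pvScan_none (args : List (List (String × String)))
    (h : pvAllHaveType args = false) (seen : PySem.Set String) (flag : Bool) :
    pvScan args seen flag = none := by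
  induction args generalizing seen flag with
  | nil => simp [pvAllHaveType] at h
  | cons arg rest ih =>
    simp only [pvAllHaveType] at h
    simp only [pvScan]
    by_cases hc : (PySem.Dict.mk arg).contains "type"
    · rw [if_pos hc] at h
      rw [pvGet_type_some arg hc]
      exact ih h _ _
    · have hn : (PySem.Dict.mk arg).get? "type" = none := by
        rw [PySem.Dict.get?_eq_none_iff_contains]
        exact Bool.eq_false_iff.mpr hc
      rw [hn]

theorem pvScan_some (args : List (List (String × String)))
    (h : pvAllHaveType args = true) (seen : PySem.Set String) (flag : Bool) :
    ∃ seen' flag', pvScan args seen flag = some (seen', flag')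
      ∧ (∀ t, PySem.Set.contains seen' t
            = (PySem.Set.contains seen t || args.any (fun arg => pvTy arg == t)))
      ∧ flag' = (flag || args.any (fun arg => PySem.Str.isIn "TensorOptions" (pvTy arg))) := by
  induction args generalizing seen flag with
  | nil => exact ⟨seen, flag, rfl, by simp, by simp⟩
  | cons arg rest ih =>
    simp only [pvAllHaveType] at h
    by_cases hc : (PySem.Dict.mk arg).contains "type"
    · rw [if_pos hc] at h
      obtain ⟨seen', flag', heq, hmem, hflag⟩ :=
        ih h (PySem.Set.add seen (pvTy arg)) (flag || PySem.Str.isIn "TensorOptions" (pvTy arg))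
      refine ⟨seen', flag', ?_, ?_, ?_⟩
      · rw [pvScan, pvGet_type_some arg hc]
        exact heq
      · intro u
        rw [hmem u, pvContains_add]
        simp only [List.any_cons, Bool.or_assoc]
      · rw [hflag]
        simp only [List.any_cons, Bool.or_assoc]
    · rw [if_neg hc] at h
      exact absurd h (by simp)

-- ===== VERDICT (by name: the statement is the Claim_ definition above) =====
theorem check_if_factory_method_spec : Claim_equal_check_if_factory_method := by
  intro args _
  unfold Spec_check_if_factory_method check_if_factory_method check_if_factory_method_alt
  rcases Bool.eq_false_or_eq_true (pvAllHaveType args) with h | h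
  swap
  · rw [pvScan_none args h PySem.Set.empty false, h]
    rfl
  · obtain ⟨seen, flag, heq, hmem, hflag⟩ := pvScan_some args h PySem.Set.empty false
    rw [heq, h]
    simp only [if_true, List.all_cons, List.all_nil, Bool.and_true, hmem, hflag]
    simp only [PySem.Set.contains, PySem.Set.empty, List.elem_nil, Bool.false_or]
    simp only [Bool.and_assoc, Bool.or_assoc]
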